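-- pv_equiv track=rewrite | github.com/mohit-aggarwal314/bulidingcode | pynitefunction.py | generate_members
-- ===== SOURCE A (Python) =====
-- import itertools
--
-- def generate_members(node_coordinates):
--     pairs = []
--
--     for pair in itertools.combinations(node_coordinates, 2):
--         no_overlap = True
--
--         for existing_pair in pairs:
--             if any(coord in existing_pair for coord in pair):
--                 no_overlap = False
--                 break
--
--         if no_overlap:
--             pairs.append(pair)
--
--     return pairs
-- ===== SOURCE B (Python) =====
-- def generate_members(node_coordinates):
--     xs = list(node_coordinates)
--     used = []
--     result = []
--     for i in range(len(xs)):
--         if xs[i] in used: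
--             continue
--         for j in range(i + 1, len(xs)):
--             if xs[j] not in used:
--                 result.append((xs[i], xs[j]))
--                 used.append(xs[i])
--                 used.append(xs[j])
--                 break
--     return result
-- ===== Notes on version B (the rewrite author's own statement) =====
-- stated objective: faster
-- what changed: Replaces A's enumeration of all O(n^2) combinations (each rescanned against every accepted pair) with a single greedy forward sweep over indices that keeps a flat list of used coordinate values and pairs each unused element with the next unused one.
import Mathlib
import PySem

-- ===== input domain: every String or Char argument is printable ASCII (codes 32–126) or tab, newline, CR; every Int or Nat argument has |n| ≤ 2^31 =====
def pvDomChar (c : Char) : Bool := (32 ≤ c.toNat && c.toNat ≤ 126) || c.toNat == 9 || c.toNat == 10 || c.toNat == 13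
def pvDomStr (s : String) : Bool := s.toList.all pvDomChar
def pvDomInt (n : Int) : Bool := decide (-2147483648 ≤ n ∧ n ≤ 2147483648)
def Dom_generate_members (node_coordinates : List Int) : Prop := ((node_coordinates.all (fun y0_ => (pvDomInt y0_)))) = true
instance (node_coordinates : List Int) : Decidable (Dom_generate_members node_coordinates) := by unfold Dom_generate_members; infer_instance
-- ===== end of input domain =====

-- B replaces A's scan of all O(n^2) combinations (each checked against every accepted pair)
-- by a single greedy forward sweep with a `used` list; objective: faster.

-- ===== PORT A =====
-- itertools.combinations(xs, 2), in Python's order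
def pyCombinations2 (xs : List Int) : List (Int × Int) :=
  match xs with
  | [] => []
  | x :: rest => rest.map (fun y => (x, y)) ++ pyCombinations2 rest

-- body of A's outer loop: the inner for/break is `any`, then the append
def gmStep (pairs : List (Int × Int)) (pair : Int × Int) : List (Int × Int) :=
  if pairs.any (fun ep => pair.1 == ep.1 || pair.1 == ep.2 || pair.2 == ep.1 || pair.2 == ep.2)
  then pairs
  else pairs ++ [pair]

def generate_members (node_coordinates : List Int) : List (Int × Int) :=
  (pyCombinations2 node_coordinates).foldl gmStep []

-- ===== PORT B =====
-- B's outer loop over i; the inner j-loop with break is `find?` on the rest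
def gmAltLoop (used : List Int) (result : List (Int × Int)) : List Int → List (Int × Int)
  | [] => result
  | x :: rest =>
    if used.contains x then gmAltLoop used result rest
    else
      match rest.find? (fun y => !(used.contains y)) with
      | none => gmAltLoop used result rest
      | some y => gmAltLoop (used ++ [x, y]) (result ++ [(x, y)]) rest

def generate_members_alt (node_coordinates : List Int) : List (Int × Int) :=
  gmAltLoop [] [] node_coordinates

-- ===== PRECONDITION & SPEC =====
def Spec_generate_members (node_coordinates : List Int) (out : List (Int × Int)) : Prop := out = generate_members_alt node_coordinates
instance (node_coordinates : List Int) (out : List (Int × Int)) : Decidable (Spec_generate_members node_coordinates out) := by unfold Spec_generate_members; infer_instance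

-- ===== CLAIM (what is proved, stated in full; the proofs are below) =====
def Claim_equal_generate_members : Prop := ∀ (node_coordinates : List Int), Dom_generate_members node_coordinates → Spec_generate_members node_coordinates (generate_members node_coordinates)

-- ===== LEMMAS AND PROOFS =====

-- all coordinate values of the accepted pairs, flattened in order (B's `used` list)
def gmFlat (ps : List (Int × Int)) : List Int := ps.flatMap (fun p => [p.1, p.2])

theorem gmAny_eq (pairs : List (Int × Int)) (x y : Int) :
    (pairs.any (fun ep => x == ep.1 || x == ep.2 || y == ep.1 || y == ep.2))
      = decide (x ∈ gmFlat pairs ∨ y ∈ gmFlat pairs) := by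
  rw [Bool.eq_iff_iff]
  simp [gmFlat, List.any_eq_true]
  aesop

theorem gmFlat_append (ps : List (Int × Int)) (x y : Int) :
    gmFlat (ps ++ [(x, y)]) = gmFlat ps ++ [x, y] := by
  simp [gmFlat]

-- once x is used, every pair (x, _) is rejected
theorem foldl_map_used (ys : List Int) (pairs : List (Int × Int)) (x : Int)
    (hx : x ∈ gmFlat pairs) :
    (ys.map (fun y => (x, y))).foldl gmStep pairs = pairs := by
  induction ys with
  | nil => rfl
  | cons y ys ih =>
    have hstep : gmStep pairs (x, y) = pairs := by
      simp [gmStep, gmAny_eq, hx]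
    simp [List.map_cons, List.foldl_cons, hstep, ih]

-- if x is unused, the fold over (x, y) for y in ys accepts exactly the first unused y
theorem foldl_map_unused (ys : List Int) (pairs : List (Int × Int)) (x : Int)
    (hx : x ∉ gmFlat pairs) :
    (ys.map (fun y => (x, y))).foldl gmStep pairs =
      (match ys.find? (fun y => !decide (y ∈ gmFlat pairs)) with
       | none => pairs
       | some y => pairs ++ [(x, y)]) := by
  induction ys with
  | nil => rfl
  | cons y ys ih =>
    by_cases hy : y ∈ gmFlat pairs
    · have hstep : gmStep pairs (x, y) = pairs := by
        simp [gmStep, gmAny_eq, hy]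
      simp [List.map_cons, List.foldl_cons, hstep, hy, ih]
    · have hstep : gmStep pairs (x, y) = pairs ++ [(x, y)] := by
        simp [gmStep, gmAny_eq, hx, hy]
      have hx' : x ∈ gmFlat (pairs ++ [(x, y)]) := by
        simp [gmFlat]
      simp [List.map_cons, List.foldl_cons, hstep, hy,
        foldl_map_used ys (pairs ++ [(x, y)]) x hx']

theorem gm_main (xs : List Int) : ∀ pairs : List (Int × Int),
    (pyCombinations2 xs).foldl gmStep pairs = gmAltLoop (gmFlat pairs) pairs xs := by
  induction xs with
  | nil => intro pairs; rfl
  | cons x rest ih =>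
    intro pairs
    rw [pyCombinations2, List.foldl_append]
    by_cases hx : x ∈ gmFlat pairs
    · rw [foldl_map_used rest pairs x hx, ih pairs]
      simp [gmAltLoop, hx]
    · rw [foldl_map_unused rest pairs x hx]
      cases hf : rest.find? (fun y => !decide (y ∈ gmFlat pairs)) with
      | none =>
        simp only
        rw [ih pairs]
        simp [gmAltLoop, hx, hf]
      | some y =>
        simp only
        rw [ih (pairs ++ [(x, y)]), gmFlat_append]
        simp [gmAltLoop, hx, hf]

-- ===== VERDICT (by name: the statement is the Claim_ definition above) =====
theorem generate_members_spec : Claim_equal_generate_members := by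
  intro xs _
  show generate_members xs = generate_members_alt xs
  rw [generate_members, generate_members_alt, gm_main xs []]
  rfl
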